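-- pv_equiv track=rewrite | github.com/Stoick643/pd-triglav | utils/hero_utils.py | get_time_period
-- ===== SOURCE A (Python) =====
-- def get_time_period(hour, season):
--     """Determines time period (dawn/day/dusk/night) based on hour and season."""
--     # Seasonal time boundaries - daylight hours vary by season
--     time_boundaries = {
--         "winter": {"dawn": (5, 9), "day": (9, 17), "dusk": (17, 22), "night": (22, 5)},
--         "spring": {"dawn": (5, 9), "day": (9, 18), "dusk": (18, 22), "night": (22, 5)},
--         "summer": {"dawn": (4, 8), "day": (8, 19), "dusk": (19, 23), "night": (23, 4)},
--         "autumn": {"dawn": (6, 9), "day": (9, 17), "dusk": (17, 21), "night": (21, 6)},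
--     }
--
--     boundaries = time_boundaries[season]
--
--     # Check each time period
--     for period, (start, end) in boundaries.items():
--         if period == "night":
--             # Night spans midnight (e.g., 22-5 means 22:00-23:59 and 00:00-04:59)
--             if start > end:  # Crosses midnight
--                 if hour >= start or hour < end:
--                     return "night"
--             else:  # Doesn't cross midnight (shouldn't happen for night, but safety)
--                 if start <= hour < end:
--                     return "night"
--         else:
--             # Regular time periods
--             if start <= hour < end:
--                 return period
--
--     # Default fallback
--     return "day"
-- ===== SOURCE B (Python) =====
-- def get_time_period(hour, season):
--     """Determines time period (dawn/day/dusk/night) based on hour and season."""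
--     # Sorted breakpoints (dawn, day, dusk, night start hours) per season.
--     breakpoints = {
--         "winter": [5, 9, 17, 22],
--         "spring": [5, 9, 18, 22],
--         "summer": [4, 8, 19, 23],
--         "autumn": [6, 9, 17, 21],
--     }
--     # labels[k] = period when exactly k breakpoints are <= hour
--     labels = ["night", "dawn", "day", "dusk", "night"]
--     rank = sum(1 for b in breakpoints[season] if hour >= b)
--     return labels[rank]
-- ===== Notes on version B (the rewrite author's own statement) =====
-- stated objective: alternative
-- what changed: Replaces A's loop over per-period (start,end) ranges with midnight-wraparound night logic by counting the hour's rank among the season's four sorted breakpoint hours and indexing a 5-entry label table (night is both ends).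
-- outside the precondition, e.g. on get_time_period(7, 'monsoon'): A raises KeyError, B raises KeyError
import Mathlib
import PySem

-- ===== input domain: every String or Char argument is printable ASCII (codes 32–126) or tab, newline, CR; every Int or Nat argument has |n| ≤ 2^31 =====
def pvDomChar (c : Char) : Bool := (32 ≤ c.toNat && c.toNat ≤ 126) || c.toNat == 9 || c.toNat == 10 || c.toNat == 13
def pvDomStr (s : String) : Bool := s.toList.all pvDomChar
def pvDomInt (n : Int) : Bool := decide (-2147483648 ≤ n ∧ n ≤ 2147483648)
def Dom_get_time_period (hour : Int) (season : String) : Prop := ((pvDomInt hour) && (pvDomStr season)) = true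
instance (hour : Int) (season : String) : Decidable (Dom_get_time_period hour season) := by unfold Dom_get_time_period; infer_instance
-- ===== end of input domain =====

-- B replaces A's loop over per-period ranges (with midnight-wraparound night logic and a dead
-- 'day' fallback) by rank-counting the hour among the season's sorted breakpoints and indexing
-- a label table; Pre_ excludes the seasons on which both raise KeyError.


-- ===== PORT A =====
-- time_boundaries[season]: the season's dict as an ordered item list (none = KeyError)
def pvPeriodsA (season : String) : Option (List (String × Int × Int)) :=
  if season = "winter" then some [("dawn", 5, 9), ("day", 9, 17), ("dusk", 17, 22), ("night", 22, 5)]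
  else if season = "spring" then some [("dawn", 5, 9), ("day", 9, 18), ("dusk", 18, 22), ("night", 22, 5)]
  else if season = "summer" then some [("dawn", 4, 8), ("day", 8, 19), ("dusk", 19, 23), ("night", 23, 4)]
  else if season = "autumn" then some [("dawn", 6, 9), ("day", 9, 17), ("dusk", 17, 21), ("night", 21, 6)]
  else none

-- the 'for period, (start, end) in boundaries.items()' loop, branch for branch
def pvLoopA (hour : Int) : List (String × Int × Int) → String
  | [] => "day"          -- default fallback
  | (period, s, e) :: rest =>
    if period = "night" then
      if s > e then
        (if hour ≥ s ∨ hour < e then "night" else pvLoopA hour rest)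
      else
        (if s ≤ hour ∧ hour < e then "night" else pvLoopA hour rest)
    else
      if s ≤ hour ∧ hour < e then period else pvLoopA hour rest

def get_time_period (hour : Int) (season : String) : String :=
  match pvPeriodsA season with
  | some bs => pvLoopA hour bs
  | none => ""           -- KeyError in Python; excluded by Pre_

-- ===== PORT B =====
-- breakpoints[season] (none = KeyError)
def pvBreaksB (season : String) : Option (List Int) :=
  if season = "winter" then some [5, 9, 17, 22]
  else if season = "spring" then some [5, 9, 18, 22]
  else if season = "summer" then some [4, 8, 19, 23]
  else if season = "autumn" then some [6, 9, 17, 21]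
  else none

def pvLabelsB : List String := ["night", "dawn", "day", "dusk", "night"]

def get_time_period_alt (hour : Int) (season : String) : String :=
  match pvBreaksB season with
  | some bs =>
    let rank : Int := bs.foldl (fun acc b => acc + (if hour ≥ b then 1 else 0)) 0
    (PySem.List.pyGet? pvLabelsB rank).getD ""
  | none => ""           -- KeyError in Python; excluded by Pre_

-- ===== PRECONDITION & SPEC =====
-- A (and B) raise KeyError on any season outside the four keys; Pre_ admits exactly the four.
def Pre_get_time_period (hour : Int) (season : String) : Prop :=
  season = "winter" ∨ season = "spring" ∨ season = "summer" ∨ season = "autumn"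
instance (hour : Int) (season : String) : Decidable (Pre_get_time_period hour season) := by
  unfold Pre_get_time_period; infer_instance
def pvWitness_get_time_period : Int × String := (7, "winter")

def Spec_get_time_period (hour : Int) (season : String) (out : String) : Prop := out = get_time_period_alt hour season
instance (hour : Int) (season : String) (out : String) : Decidable (Spec_get_time_period hour season out) := by unfold Spec_get_time_period; infer_instance

-- ===== CLAIM (what is proved, stated in full; the proofs are below) =====
def Claim_equal_get_time_period : Prop := ∀ (hour : Int) (season : String), Dom_get_time_period hour season → Pre_get_time_period hour season → Spec_get_time_period hour season (get_time_period hour season)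

-- ===== LEMMAS AND PROOFS =====
-- One generic lemma: for strictly increasing breakpoints d1<d2<d3<d4, A's loop over the four
-- periods equals B's rank-count into the label table.
theorem pvKey (d1 d2 d3 d4 hour : Int) (h12 : d1 < d2) (h23 : d2 < d3) (h34 : d3 < d4) :
    pvLoopA hour [("dawn", d1, d2), ("day", d2, d3), ("dusk", d3, d4), ("night", d4, d1)]
    = (PySem.List.pyGet? pvLabelsB
        ([d1, d2, d3, d4].foldl (fun acc b => acc + (if hour ≥ b then 1 else 0)) 0)).getD "" := by
  simp only [pvLoopA, List.foldl, String.reduceEq, reduceIte]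
  rcases show hour < d1 ∨ (d1 ≤ hour ∧ hour < d2) ∨ (d2 ≤ hour ∧ hour < d3) ∨
      (d3 ≤ hour ∧ hour < d4) ∨ d4 ≤ hour by omega with h | h | h | h | h
  · rw [if_neg (by omega : ¬(d1 ≤ hour ∧ hour < d2)),
        if_neg (by omega : ¬(d2 ≤ hour ∧ hour < d3)),
        if_neg (by omega : ¬(d3 ≤ hour ∧ hour < d4)),
        if_pos (by omega : d4 > d1),
        if_pos (by omega : hour ≥ d4 ∨ hour < d1),
        if_neg (by omega : ¬hour ≥ d1), if_neg (by omega : ¬hour ≥ d2),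
        if_neg (by omega : ¬hour ≥ d3), if_neg (by omega : ¬hour ≥ d4)]
    rfl
  · rw [if_pos (by omega : d1 ≤ hour ∧ hour < d2),
        if_pos (by omega : hour ≥ d1), if_neg (by omega : ¬hour ≥ d2),
        if_neg (by omega : ¬hour ≥ d3), if_neg (by omega : ¬hour ≥ d4)]
    rfl
  · rw [if_neg (by omega : ¬(d1 ≤ hour ∧ hour < d2)),
        if_pos (by omega : d2 ≤ hour ∧ hour < d3),
        if_pos (by omega : hour ≥ d1), if_pos (by omega : hour ≥ d2),
        if_neg (by omega : ¬hour ≥ d3), if_neg (by omega : ¬hour ≥ d4)]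
    rfl
  · rw [if_neg (by omega : ¬(d1 ≤ hour ∧ hour < d2)),
        if_neg (by omega : ¬(d2 ≤ hour ∧ hour < d3)),
        if_pos (by omega : d3 ≤ hour ∧ hour < d4),
        if_pos (by omega : hour ≥ d1), if_pos (by omega : hour ≥ d2),
        if_pos (by omega : hour ≥ d3), if_neg (by omega : ¬hour ≥ d4)]
    rfl
  · rw [if_neg (by omega : ¬(d1 ≤ hour ∧ hour < d2)),
        if_neg (by omega : ¬(d2 ≤ hour ∧ hour < d3)),
        if_neg (by omega : ¬(d3 ≤ hour ∧ hour < d4)),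
        if_pos (by omega : d4 > d1),
        if_pos (by omega : hour ≥ d4 ∨ hour < d1),
        if_pos (by omega : hour ≥ d1), if_pos (by omega : hour ≥ d2),
        if_pos (by omega : hour ≥ d3), if_pos (by omega : hour ≥ d4)]
    rfl

-- ===== VERDICT (by name: the statement is the Claim_ definition above) =====
theorem get_time_period_spec : Claim_equal_get_time_period := by
  intro hour season _ hpre
  unfold Spec_get_time_period
  rcases hpre with h | h | h | h <;> subst h <;>
    simp only [get_time_period, get_time_period_alt, pvPeriodsA, pvBreaksB, reduceIte,
      String.reduceEq]
  · exact pvKey 5 9 17 22 hour (by norm_num) (by norm_num) (by norm_num)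
  · exact pvKey 5 9 18 22 hour (by norm_num) (by norm_num) (by norm_num)
  · exact pvKey 4 8 19 23 hour (by norm_num) (by norm_num) (by norm_num)
  · exact pvKey 6 9 17 21 hour (by norm_num) (by norm_num) (by norm_num)
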